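-- pv_equiv track=rewrite | github.com/gueguet/codewars_solution | python/7kyu/double_every_other.py | double_every_other
-- ===== SOURCE A (Python) =====
-- def double_every_other(lst):
--     res = []
--     for ind,x in enumerate(lst):
--         if (ind%2 != 0):
--             res.append(2*x)
--         else:
--             res.append(x)
--     return res
-- ===== SOURCE B (Python) =====
-- def double_every_other(lst):
--     res = list(lst)
--     res[1::2] = [2 * x for x in lst[1::2]]
--     return res
-- ===== Notes on version B (the rewrite author's own statement) =====
-- stated objective: idiomatic
-- what changed: Replaces the index-parity branch inside an enumerate loop by copying the list and reassigning its odd strided slice in one shot with a slice assignment.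
import Mathlib
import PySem

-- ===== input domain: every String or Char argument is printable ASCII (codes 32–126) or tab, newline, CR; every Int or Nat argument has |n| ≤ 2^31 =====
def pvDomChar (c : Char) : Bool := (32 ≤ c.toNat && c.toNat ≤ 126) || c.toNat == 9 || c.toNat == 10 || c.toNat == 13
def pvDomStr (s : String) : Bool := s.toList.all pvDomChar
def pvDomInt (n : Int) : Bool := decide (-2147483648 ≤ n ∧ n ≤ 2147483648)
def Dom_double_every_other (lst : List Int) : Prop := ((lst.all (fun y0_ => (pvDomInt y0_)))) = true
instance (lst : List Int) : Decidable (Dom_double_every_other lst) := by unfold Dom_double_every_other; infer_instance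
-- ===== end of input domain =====

-- B replaces A's enumerate loop with an index-parity branch by a copy + strided odd-slice
-- reassignment (res[1::2] = [2*x for x in lst[1::2]]); objective: idiomatic, same cost.


-- ===== PORT A =====
-- res = []; for ind, x in enumerate(lst): append 2*x if ind % 2 != 0 else x
def double_every_other (lst : List Int) : List Int :=
  (PySem.List.enumerate lst 0).foldl
    (fun res p => if PySem.Int.mod p.1 2 ≠ 0 then res ++ [2 * p.2] else res ++ [p.2]) []

-- ===== PORT B =====
-- hand port of the slice assignment res[1::2] = vs (equal lengths, odd stride): place the
-- replacement values at positions 1, 3, 5, … of the copied list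
def pvAssignOdd : List Int → List Int → List Int
  | a :: _b :: rest, v :: vs => a :: v :: pvAssignOdd rest vs
  | xs, _ => xs

def double_every_other_alt (lst : List Int) : List Int :=
  -- lst[1::2]: step 2 ≠ 0, so slice? always returns some; getD [] is never the default
  pvAssignOdd lst (((PySem.List.slice? lst (some 1) none 2).getD []).map (fun x => 2 * x))

-- ===== PRECONDITION & SPEC =====
def Spec_double_every_other (lst : List Int) (out : List Int) : Prop := out = double_every_other_alt lst
instance (lst : List Int) (out : List Int) : Decidable (Spec_double_every_other lst out) := by unfold Spec_double_every_other; infer_instance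

-- ===== CLAIM (what is proved, stated in full; the proofs are below) =====
def Claim_equal_double_every_other : Prop := ∀ (lst : List Int), Dom_double_every_other lst → Spec_double_every_other lst (double_every_other lst)

-- ===== LEMMAS AND PROOFS =====

-- common spec: double the elements at odd positions, two at a time
def pvF : List Int → List Int
  | a :: b :: rest => a :: 2 * b :: pvF rest
  | xs => xs

-- elements at odd positions of lst, i.e. lst[1::2]
def pvOdds : List Int → List Int
  | _ :: b :: rest => b :: pvOdds rest
  | _ => []

theorem pvA_eq_map (lst : List Int) :
    double_every_other lst
      = (PySem.List.enumerate lst 0).map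
          (fun p => if PySem.Int.mod p.1 2 ≠ 0 then 2 * p.2 else p.2) := by
  unfold double_every_other
  have h : (fun (res : List Int) (p : Int × Int) =>
      if PySem.Int.mod p.1 2 ≠ 0 then res ++ [2 * p.2] else res ++ [p.2])
      = fun res p => res ++ [if PySem.Int.mod p.1 2 ≠ 0 then 2 * p.2 else p.2] := by
    funext res p; split <;> rfl
  rw [h, PySem.List.foldl_append_singleton_eq_map, List.nil_append]

theorem pvOdds_head_irrel (x y : Int) (r : List Int) : pvOdds (x :: r) = pvOdds (y :: r) := by
  cases r <;> simp [pvOdds]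

theorem pvMap_enum_eq_pvF :
    ∀ (lst : List Int) (s : Int), PySem.Int.mod s 2 = 0 →
      (PySem.List.enumerate lst s).map
          (fun p => if PySem.Int.mod p.1 2 ≠ 0 then 2 * p.2 else p.2) = pvF lst
  | [], s, h => by simp [pvF, PySem.List.enumerate_nil]
  | [a], s, h => by
    rw [PySem.List.enumerate_cons, PySem.List.enumerate_nil]
    simp only [List.map_cons, List.map_nil, pvF]
    rw [if_neg (not_not_intro h)]
  | a :: b :: rest, s, h => by
    have hs1 : PySem.Int.mod (s + 1) 2 ≠ 0 := by
      rw [PySem.Int.mod_eq_emod_of_pos (by omega)]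
      rw [PySem.Int.mod_eq_emod_of_pos (by omega)] at h
      omega
    have hs2 : PySem.Int.mod (s + 1 + 1) 2 = 0 := by
      rw [PySem.Int.mod_eq_emod_of_pos (by omega)]
      rw [PySem.Int.mod_eq_emod_of_pos (by omega)] at h
      omega
    rw [PySem.List.enumerate_cons, PySem.List.enumerate_cons]
    simp only [List.map_cons, pvF]
    rw [pvMap_enum_eq_pvF rest (s + 1 + 1) hs2]
    rw [if_neg (not_not_intro h), if_pos hs1]

theorem pvFilterMap_even :
    ∀ (r : List Int),
      List.filterMap (fun k => r[2 * k]?) (List.range ((r.length + 1) / 2))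
        = pvOdds (0 :: r)
  | [] => by simp [pvOdds]
  | [x] => by simp [pvOdds, List.range_succ]
  | x :: y :: r => by
    have hc : ((x :: y :: r).length + 1) / 2 = (r.length + 1) / 2 + 1 := by
      simp; omega
    rw [hc, List.range_succ_eq_map, List.filterMap_cons, List.filterMap_map]
    have hcomp : ((fun k => (x :: y :: r)[2 * k]?) ∘ (fun n => n + 1))
        = fun k => r[2 * k]? := by
      funext k
      have h2 : 2 * (k + 1) = 2 * k + 2 := by omega
      simp [Function.comp, h2]
    rw [hcomp, pvFilterMap_even r]
    simp only [Nat.mul_zero, List.getElem?_cons_zero]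
    rw [pvOdds_head_irrel 0 y r]
    rfl

theorem pvSlice_eq_pvOdds (lst : List Int) :
    PySem.List.slice? lst (some 1) none 2 = some (pvOdds lst) := by
  cases lst with
  | nil => decide
  | cons a rest =>
    simp only [PySem.List.slice?, PySem.List.sliceIndices]
    norm_num
    by_cases hr : rest = []
    · subst hr; simp [pvOdds]
    · have hpos : 0 < rest.length := List.length_pos_iff.mpr hr
      rw [if_pos hpos]
      have hcount : (((rest.length : Int) + 2 - 1) / 2).toNat = (rest.length + 1) / 2 := by
        omega
      rw [hcount]
      have hfun : (fun k : Nat => (a :: rest)[((1 : Int) + 2 * (k : Int)).toNat]?)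
          = fun k : Nat => rest[2 * k]? := by
        funext k
        have h1 : ((1 : Int) + 2 * (k : Int)).toNat = 2 * k + 1 := by omega
        rw [h1]
        simp
      rw [hfun, pvFilterMap_even rest, pvOdds_head_irrel 0 a rest]

theorem pvAssign_odds :
    ∀ (lst : List Int),
      pvAssignOdd lst ((pvOdds lst).map (fun x => 2 * x)) = pvF lst
  | [] => rfl
  | [a] => rfl
  | a :: b :: rest => by
    simp only [pvOdds, List.map_cons, pvAssignOdd, pvF]
    rw [pvAssign_odds rest]

theorem pvB_eq_pvF (lst : List Int) : double_every_other_alt lst = pvF lst := by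
  unfold double_every_other_alt
  rw [pvSlice_eq_pvOdds, Option.getD_some, pvAssign_odds]

-- ===== VERDICT (by name: the statement is the Claim_ definition above) =====
theorem double_every_other_spec : Claim_equal_double_every_other := by
  intro lst _
  unfold Spec_double_every_other
  rw [pvA_eq_map, pvMap_enum_eq_pvF lst 0 (by decide), pvB_eq_pvF]
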